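-- pv_equiv track=rewrite | github.com/bob686868/Leetcode-100-day-challenge- | day39.py | lc1578
-- ===== SOURCE A (Python) =====
-- def lc1578(colors,neededTime):
--     prevTimeNeeded=-1
--     time=0
--     for i in range(1,len(colors)):
--         if colors[i]!=colors[i-1]:
--             prevTimeNeeded=-1
--             continue
--         if prevTimeNeeded==-1:
--             prevTimeNeeded=neededTime[i-1]
--
--         time+=min(neededTime[i],prevTimeNeeded)
--
--         prevTimeNeeded=max(prevTimeNeeded,neededTime[i])
--     return time
-- ===== SOURCE B (Python) =====
-- def lc1578(colors, neededTime):
--     total = 0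
--     i = 0
--     n = len(colors)
--     while i < n:
--         j = i + 1
--         while j < n and colors[j] == colors[i]:
--             j += 1
--         if j - i > 1:
--             group = neededTime[i:j]
--             total += sum(group) - max(group)
--         i = j
--     return total
-- ===== Notes on version B (the rewrite author's own statement) =====
-- stated objective: alternative
-- what changed: Replaces A's single sweep with a sentinel-reset running-max state by explicit two-pointer grouping: find each maximal equal-color run, add sum(run)-max(run) per run, keeping no per-step state.
-- outside the precondition, e.g. on lc1578('aaa', [-1, -5, 0]): A returns -10, B returns -6
import Mathlib
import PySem

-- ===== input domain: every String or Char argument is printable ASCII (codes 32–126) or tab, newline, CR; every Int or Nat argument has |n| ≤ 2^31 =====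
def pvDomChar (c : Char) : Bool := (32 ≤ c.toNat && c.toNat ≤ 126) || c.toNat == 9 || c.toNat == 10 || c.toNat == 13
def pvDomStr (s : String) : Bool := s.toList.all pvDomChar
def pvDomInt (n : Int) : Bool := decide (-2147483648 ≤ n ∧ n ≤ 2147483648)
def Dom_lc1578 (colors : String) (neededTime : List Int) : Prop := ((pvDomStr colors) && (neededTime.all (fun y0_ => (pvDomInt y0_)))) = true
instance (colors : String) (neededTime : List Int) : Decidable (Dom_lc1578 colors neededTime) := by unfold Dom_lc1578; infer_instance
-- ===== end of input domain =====

-- B groups the array by maximal equal-color runs with two pointers and adds sum-max per run,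
-- instead of A's per-step running-max state with a -1 sentinel; equal return value on Pre_lc1578.

-- ===== PORT A =====
-- one iteration of A's 'for i in range(1, len(colors))' loop body; state = (prevTimeNeeded, time)
def aStep (cs : List Char) (nt : List Int) (st : Int × Int) (i : Int) : Int × Int :=
  if PySem.List.pyGetD cs i ' ' ≠ PySem.List.pyGetD cs (i - 1) ' ' then (-1, st.2)
  else
    let prev := if st.1 = -1 then PySem.List.pyGetD nt (i - 1) 0 else st.1
    (max prev (PySem.List.pyGetD nt i 0), st.2 + min (PySem.List.pyGetD nt i 0) prev)

def lc1578 (colors : String) (neededTime : List Int) : Int :=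
  ((PySem.List.pyRange 1 (colors.toList.length : Int) 1).foldl
    (aStep colors.toList neededTime) (-1, 0)).2

-- ===== PORT B =====
-- inner 'while j < n and colors[j] == colors[i]' loop: first index ≥ j whose color differs from c
def bRun (cs : List Char) (c : Char) (j : Nat) : Nat :=
  if h : j < cs.length then
    if cs[j] = c then bRun cs c (j + 1) else j
  else j
termination_by cs.length - j

-- cited by bLoop's termination proof
theorem bRun_ge (cs : List Char) (c : Char) (j : Nat) : j ≤ bRun cs c j := by
  induction j using bRun.induct cs c with
  | case1 x h heq ih => unfold bRun; simp [h, heq]; omega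
  | case2 x h heq => unfold bRun; simp [h, heq]
  | case3 x h => unfold bRun; simp [h]

-- outer 'while i < n' loop of B
def bLoop (cs : List Char) (nt : List Int) (i : Nat) : Int :=
  if h : i < cs.length then
    let j := bRun cs cs[i] (i + 1)
    (if 1 < j - i then
      let g := PySem.List.slice nt (some (i : Int)) (some (j : Int))
      g.sum - ((PySem.List.max? g (fun x => x)).getD 0)
     else 0) + bLoop cs nt j
  else 0
termination_by cs.length - i
decreasing_by
  have := bRun_ge cs cs[i] (i + 1)
  omega

def lc1578_alt (colors : String) (neededTime : List Int) : Int :=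
  bLoop colors.toList neededTime 0

-- ===== PRECONDITION & SPEC =====
-- Pre_ excludes (a) exactly the inputs where A raises IndexError (an index k with
-- colors[k] == colors[k-1] but k out of range of neededTime), and (b) the corner inputs with
-- three consecutive equal colors whose needed times are -1 directly followed by a value < -1:
-- there A's prevTimeNeeded sentinel (-1, meaning 'no previous') collides with a genuine running
-- maximum of -1 — a corner outside the problem's nonnegative removal times, on which B computes
-- the plain per-run sum-minus-max.
def Pre_lc1578 (colors : String) (neededTime : List Int) : Prop :=
  (∀ k < colors.toList.length, 0 < k →
    colors.toList.getD k ' ' = colors.toList.getD (k - 1) ' ' → k < neededTime.length) ∧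
  ¬ (let z := colors.toList.zip neededTime
    ((z.zip (z.tail.zip z.tail.tail)).any
      (fun p => p.1.1 == p.2.1.1 && p.2.1.1 == p.2.2.1 && p.1.2 == -1 && decide (p.2.1.2 < -1))) = true)
instance (colors : String) (neededTime : List Int) : Decidable (Pre_lc1578 colors neededTime) := by
  unfold Pre_lc1578; infer_instance

def pvWitness_lc1578 : String × List Int := ("aab", [4, 2, 7])

def Spec_lc1578 (colors : String) (neededTime : List Int) (out : Int) : Prop :=
  out = lc1578_alt colors neededTime
instance (colors : String) (neededTime : List Int) (out : Int) : Decidable (Spec_lc1578 colors neededTime out) := by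
  unfold Spec_lc1578; infer_instance

-- ===== CLAIM (what is proved, stated in full; the proofs are below) =====
def Claim_equal_lc1578 : Prop := ∀ (colors : String) (neededTime : List Int), Dom_lc1578 colors neededTime → Pre_lc1578 colors neededTime → Spec_lc1578 colors neededTime (lc1578 colors neededTime)

-- ===== LEMMAS AND PROOFS =====

-- nt[a..b) read with getD (total, matching the ports' pyGetD accesses)
def pvSeg (nt : List Int) (a b : Nat) : List Int :=
  (List.range' a (b - a)).map (fun m => nt.getD m 0)

-- running maximum of nt[a..b) (meaningful for a < b)
def pvM (nt : List Int) (a b : Nat) : Int :=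
  (pvSeg nt a b).foldl max (nt.getD a 0)

def pvS (nt : List Int) (a b : Nat) : Int := (pvSeg nt a b).sum

theorem pvSeg_empty (nt : List Int) (a b : Nat) (h : b ≤ a) : pvSeg nt a b = [] := by
  simp [pvSeg, Nat.sub_eq_zero_of_le h]

theorem pvSeg_cons (nt : List Int) (a b : Nat) (h : a < b) :
    pvSeg nt a b = nt.getD a 0 :: pvSeg nt (a + 1) b := by
  have : b - a = (b - (a + 1)) + 1 := by omega
  simp [pvSeg, this, List.range'_succ]

theorem pvSeg_concat (nt : List Int) (a b : Nat) (h : a ≤ b) :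
    pvSeg nt a (b + 1) = pvSeg nt a b ++ [nt.getD b 0] := by
  have h1 : b + 1 - a = (b - a) + 1 := by omega
  have h2 : a + (b - a) = b := by omega
  simp [pvSeg, h1, List.range'_1_concat, h2]

theorem pvM_succ (nt : List Int) (a b : Nat) (h : a ≤ b) :
    pvM nt a (b + 1) = max (pvM nt a b) (nt.getD b 0) := by
  simp [pvM, pvSeg_concat nt a b h, List.foldl_append]

theorem pvS_cons (nt : List Int) (a b : Nat) (h : a < b) :
    pvS nt a b = nt.getD a 0 + pvS nt (a + 1) b := by
  simp [pvS, pvSeg_cons nt a b h]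

theorem pvM_single (nt : List Int) (a : Nat) : pvM nt a (a + 1) = nt.getD a 0 := by
  simp [pvM, pvSeg_cons nt a (a + 1) (by omega), pvSeg_empty nt (a + 1) (a + 1) le_rfl]

theorem pvM_le (nt : List Int) (a b m : Nat) (ham : a ≤ m) (hmb : m < b) :
    nt.getD m 0 ≤ pvM nt a b := by
  have hmem : nt.getD m 0 ∈ pvSeg nt a b := by
    simp only [pvSeg, List.mem_map]
    exact ⟨m, by rw [List.mem_range'_1]; omega, rfl⟩
  exact (PySem.List.le_foldl_max (pvSeg nt a b) (nt.getD a 0)).2 _ hmem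

theorem pvM_attained (nt : List Int) (a b : Nat) (h : a < b) :
    ∃ m, a ≤ m ∧ m < b ∧ nt.getD m 0 = pvM nt a b := by
  rcases PySem.List.foldl_max_mem (pvSeg nt a b) (nt.getD a 0) with heq | hmem
  · exact ⟨a, le_rfl, h, heq.symm⟩
  · simp only [pvSeg, List.mem_map] at hmem
    rcases hmem with ⟨m, hm, hval⟩
    rw [List.mem_range'_1] at hm
    exact ⟨m, by omega, by omega, hval⟩

-- the run invariant: starting a run step with prev = running max, A's fold over [k, j) adds
-- sum nt[k..j) + max nt[i..k) - max nt[i..j) and ends with prev = max nt[i..j)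
theorem pvL2 (cs : List Char) (nt : List Int) (i j : Nat)
    (hrun : ∀ m, i < m → m < j → cs.getD m ' ' = cs.getD (m - 1) ' ')
    (hG : ∀ k, i + 1 < k → k < j → pvM nt i k = -1 → nt.getD (k - 1) 0 = -1) :
    ∀ d k t, j - k = d → i < k → k ≤ j →
      (PySem.List.pyRange (k : Int) (j : Int) 1).foldl (aStep cs nt) (pvM nt i k, t)
        = (pvM nt i j, t + pvS nt k j + pvM nt i k - pvM nt i j) := by
  intro d
  induction d with
  | zero =>
    intro k t hd hik hkj
    have hkj' : k = j := by omega
    subst hkj'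
    rw [PySem.List.pyRange_one_eq_nil (le_refl _)]
    simp [pvS, pvSeg_empty nt k k le_rfl]
  | succ d ih =>
    intro k t hd hik hkj
    have hklt : k < j := by omega
    rw [PySem.List.pyRange_one_cons (by exact_mod_cast hklt)]
    simp only [List.foldl_cons]
    have hprev : (if pvM nt i k = -1 then nt.getD (k - 1) 0 else pvM nt i k) = pvM nt i k := by
      by_cases hM : pvM nt i k = -1
      · rw [if_pos hM]
        rcases Nat.lt_or_ge (i + 1) k with hk | hk
        · rw [hG k hk hklt hM, hM]
        · have hk' : k = i + 1 := by omega
          subst hk'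
          have : i + 1 - 1 = i := by omega
          rw [this, pvM_single nt i]
      · rw [if_neg hM]
    have hstep : aStep cs nt (pvM nt i k, t) (k : Int)
        = (pvM nt i (k + 1), t + min (nt.getD k 0) (pvM nt i k)) := by
      have hk1 : ((k : Int) - 1) = ((k - 1 : Nat) : Int) := by omega
      have hcol : cs.getD k ' ' = cs.getD (k - 1) ' ' := hrun k hik hklt
      unfold aStep
      rw [hk1]
      simp only [PySem.List.pyGetD_natCast]
      rw [if_neg (not_not_intro hcol)]
      rw [hprev, pvM_succ nt i k (by omega)]
    rw [hstep]
    have := ih (k + 1) (t + min (nt.getD k 0) (pvM nt i k)) (by omega) (by omega) (by omega)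
    have hcast : ((k : Int) + 1) = ((k + 1 : Nat) : Int) := by push_cast; ring
    rw [hcast, this]
    have hSM : min (nt.getD k 0) (pvM nt i k) + pvM nt i (k + 1)
        = nt.getD k 0 + pvM nt i k := by
      rw [pvM_succ nt i k (by omega), max_comm]
      exact min_add_max _ _
    have hS : pvS nt k j = nt.getD k 0 + pvS nt (k + 1) j := pvS_cons nt k j hklt
    rw [Prod.mk.injEq]
    exact ⟨rfl, by omega⟩

-- entering a run at i with the -1 sentinel: the fold over [i+1, j) yields time t + S(i,j) - M(i,j)
theorem pvL2init (cs : List Char) (nt : List Int) (i j : Nat) (t : Int) (hij : i < j)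
    (hrun : ∀ m, i < m → m < j → cs.getD m ' ' = cs.getD (m - 1) ' ')
    (hG : ∀ k, i + 1 < k → k < j → pvM nt i k = -1 → nt.getD (k - 1) 0 = -1) :
    ∃ p, (PySem.List.pyRange ((i + 1 : Nat) : Int) (j : Int) 1).foldl (aStep cs nt) (-1, t)
        = (p, t + pvS nt i j - pvM nt i j) := by
  rcases Nat.lt_or_ge (i + 1) j with hj | hj
  · -- run of length ≥ 2: unroll the first step, which resets prev to nt[i]
    rw [PySem.List.pyRange_one_cons (by exact_mod_cast hj)]
    simp only [List.foldl_cons]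
    have hstep : aStep cs nt (-1, t) ((i + 1 : Nat) : Int)
        = (pvM nt i (i + 2), t + min (nt.getD (i + 1) 0) (pvM nt i (i + 1))) := by
      have hk1 : (((i + 1 : Nat) : Int) - 1) = ((i : Nat) : Int) := by push_cast; ring
      have hcol : cs.getD (i + 1) ' ' = cs.getD (i + 1 - 1) ' ' := hrun (i + 1) (by omega) hj
      have hcol' : cs.getD (i + 1) ' ' = cs.getD i ' ' := by simpa using hcol
      unfold aStep
      rw [hk1]
      simp only [PySem.List.pyGetD_natCast]
      rw [if_neg (not_not_intro hcol')]
      simp only [if_true]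
      rw [pvM_succ nt i (i + 1) (by omega), pvM_single nt i]
    rw [hstep]
    have hcast : (((i + 1 : Nat) : Int) + 1) = ((i + 2 : Nat) : Int) := by push_cast; ring
    rw [hcast, pvL2 cs nt i j hrun hG (j - (i + 2)) (i + 2)
      (t + min (nt.getD (i + 1) 0) (pvM nt i (i + 1))) rfl (by omega) (by omega)]
    refine ⟨pvM nt i j, ?_⟩
    have hSM : min (nt.getD (i + 1) 0) (pvM nt i (i + 1)) + pvM nt i (i + 2)
        = nt.getD (i + 1) 0 + pvM nt i (i + 1) := by
      rw [pvM_succ nt i (i + 1) (by omega), max_comm]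
      exact min_add_max _ _
    have hS1 : pvS nt i j = nt.getD i 0 + pvS nt (i + 1) j := pvS_cons nt i j (by omega)
    have hS2 : pvS nt (i + 1) j = nt.getD (i + 1) 0 + pvS nt (i + 2) j := pvS_cons nt (i + 1) j hj
    have hM1 : pvM nt i (i + 1) = nt.getD i 0 := pvM_single nt i
    rw [Prod.mk.injEq]
    exact ⟨rfl, by omega⟩
  · -- run of length 1: empty fold
    have : j = i + 1 := by omega
    subst this
    rw [PySem.List.pyRange_one_eq_nil (le_refl _)]
    refine ⟨-1, ?_⟩
    have h1 : pvS nt i (i + 1) = nt.getD i 0 := by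
      rw [pvS_cons nt i (i + 1) (by omega)]
      simp [pvS, pvSeg_empty nt (i + 1) (i + 1) le_rfl]
    simp only [List.foldl_nil]
    rw [h1, pvM_single nt i, Prod.mk.injEq]
    exact ⟨rfl, by ring⟩

theorem bRun_le_len (cs : List Char) (c : Char) (j : Nat) (h : j ≤ cs.length) :
    bRun cs c j ≤ cs.length := by
  induction j using bRun.induct cs c with
  | case1 x h' heq ih => unfold bRun; simp [h', heq]; exact ih (by omega)
  | case2 x h' heq => unfold bRun; simp [h', heq]; omega
  | case3 x h' => unfold bRun; simp [h']; omega

theorem bRun_run (cs : List Char) (c : Char) (j : Nat) :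
    ∀ m, j ≤ m → m < bRun cs c j → cs.getD m ' ' = c := by
  induction j using bRun.induct cs c with
  | case1 x h heq ih =>
    intro m hm1 hm2
    unfold bRun at hm2; simp [h, heq] at hm2
    rcases Nat.lt_or_ge m (x + 1) with hmj | hmj
    · have : m = x := by omega
      subst this
      simp [List.getD_eq_getElem?_getD, h, heq]
    · exact ih m hmj hm2
  | case2 x h heq =>
    intro m hm1 hm2
    unfold bRun at hm2; simp [h, heq] at hm2; omega
  | case3 x h =>
    intro m hm1 hm2
    unfold bRun at hm2; simp [h] at hm2; omega

theorem bRun_stop (cs : List Char) (c : Char) (j : Nat) (h : bRun cs c j < cs.length) :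
    cs.getD (bRun cs c j) ' ' ≠ c := by
  induction j using bRun.induct cs c with
  | case1 x h' heq ih =>
    unfold bRun at h ⊢; simp [h', heq] at h ⊢; exact ih h
  | case2 x h' heq =>
    unfold bRun at h ⊢; simp [h', heq] at h ⊢
  | case3 x h' =>
    unfold bRun at h; simp [h'] at h

-- B's per-run contribution equals S - M when the run's indices are inside nt
theorem pvSeg_eq_slice (nt : List Int) (a b : Nat) (hb : b ≤ nt.length) :
    PySem.List.slice nt (some (a : Int)) (some (b : Int)) = pvSeg nt a b := by
  rw [PySem.List.slice_natCast]
  apply List.ext_getElem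
  · simp [pvSeg]; omega
  · intro m h1 h2
    simp only [pvSeg] at h2 ⊢
    have hlen : m < b - a := by simpa [pvSeg] using h2
    simp only [List.getElem_take, List.getElem_drop, List.getElem_map, List.getElem_range']
    rw [List.getD_eq_getElem?_getD, List.getElem?_eq_getElem (by omega)]
    simp

theorem pvContrib (nt : List Int) (a b : Nat) (hab : a < b) (hb : b ≤ nt.length) :
    (PySem.List.slice nt (some (a : Int)) (some (b : Int))).sum
      - ((PySem.List.max? (PySem.List.slice nt (some (a : Int)) (some (b : Int))) (fun x => x)).getD 0)
      = pvS nt a b - pvM nt a b := by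
  rw [pvSeg_eq_slice nt a b hb]
  rw [pvSeg_cons nt a b hab]
  rw [PySem.List.max?_id_cons]
  have : pvM nt a b = (pvSeg nt (a + 1) b).foldl max (nt.getD a 0) := by
    simp [pvM, pvSeg_cons nt a b hab, max_self]
  simp [pvS, pvSeg_cons nt a b hab, this]

-- the outer induction: at each run start i, A's remaining fold adds bLoop cs nt i
theorem pvL3 (cs : List Char) (nt : List Int)
    (hPre : ∀ k < cs.length, 0 < k → cs.getD k ' ' = cs.getD (k - 1) ' ' → k < nt.length)
    (hD : ¬ (((cs.zip nt).zip ((cs.zip nt).tail.zip (cs.zip nt).tail.tail)).any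
      (fun p => p.1.1 == p.2.1.1 && p.2.1.1 == p.2.2.1 && p.1.2 == -1 && decide (p.2.1.2 < -1))
      = true)) :
    ∀ d i t, cs.length - i = d → i < cs.length →
      ((PySem.List.pyRange ((i + 1 : Nat) : Int) (cs.length : Int) 1).foldl
        (aStep cs nt) (-1, t)).2 = t + bLoop cs nt i := by
  intro d
  induction d using Nat.strong_induction_on with
  | _ d ih =>
    intro i t hd hin
    set n := cs.length with hn
    set j := bRun cs cs[i] (i + 1) with hj
    have hij : i + 1 ≤ j := bRun_ge cs cs[i] (i + 1)
    have hjn : j ≤ n := bRun_le_len cs cs[i] (i + 1) (by omega)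
    have hgetDi : cs.getD i ' ' = cs[i] := by
      simp [List.getD_eq_getElem?_getD, List.getElem?_eq_getElem hin]
    have hrun : ∀ m, i < m → m < j → cs.getD m ' ' = cs.getD (m - 1) ' ' := by
      intro m hm1 hm2
      have h1 : cs.getD m ' ' = cs[i] := bRun_run cs cs[i] (i + 1) m (by omega) hm2
      have h2 : cs.getD (m - 1) ' ' = cs[i] := by
        rcases Nat.lt_or_ge (m - 1) (i + 1) with hm | hm
        · have : m - 1 = i := by omega
          rw [this, hgetDi]
        · exact bRun_run cs cs[i] (i + 1) (m - 1) hm (by omega)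
      rw [h1, h2]
    have hG : ∀ k, i + 1 < k → k < j → pvM nt i k = -1 → nt.getD (k - 1) 0 = -1 := by
      intro k hk1 hk2 hM
      by_contra hne
      have hall : ∀ m, i ≤ m → m < k → nt.getD m 0 ≤ -1 := by
        intro m h1 h2
        have := pvM_le nt i k m h1 h2
        omega
      obtain ⟨m0, hm0i, hm0k, hm0v⟩ := pvM_attained nt i k (by omega)
      rw [hM] at hm0v
      -- the LAST index ≤ k - 1 whose needed time is -1
      set M0 := Nat.findGreatest (fun m => nt.getD m 0 = -1) (k - 1) with hM0
      have hPM0 : nt.getD M0 0 = -1 := by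
        rw [hM0]
        exact Nat.findGreatest_spec (P := fun m => nt.getD m 0 = -1) (m := m0) (n := k - 1) (by omega) hm0v
      have hM0le : M0 ≤ k - 1 := by
        rw [hM0]; exact Nat.findGreatest_le _
      have hM0lt : M0 < k - 1 := by
        rcases Nat.lt_or_ge M0 (k - 1) with h | h
        · exact h
        · have hEq : M0 = k - 1 := by omega
          rw [hEq] at hPM0
          omega
      have hiM0 : i ≤ M0 := by
        refine le_trans hm0i ?_
        rw [hM0]; exact Nat.le_findGreatest (P := fun m => nt.getD m 0 = -1) (m := m0) (n := k - 1) (by omega) hm0v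
      have hnextP : ¬ nt.getD (M0 + 1) 0 = -1 := by
        rw [hM0]
        exact Nat.findGreatest_is_greatest (P := fun m => nt.getD m 0 = -1) (n := k - 1)
          (k := Nat.findGreatest (fun m => nt.getD m 0 = -1) (k - 1) + 1) (by omega) (by omega)
      have hnext : nt.getD (M0 + 1) 0 < -1 := by
        have := hall (M0 + 1) (by omega) (by omega)
        omega
      -- the three positions M0, M0+1, M0+2 lie in the run and inside both lists
      have hcs2 : M0 + 2 < n := by omega
      have hrun1 : cs.getD (M0 + 1) ' ' = cs.getD M0 ' ' := by
        have := hrun (M0 + 1) (by omega) (by omega)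
        simpa using this
      have hrun2 : cs.getD (M0 + 2) ' ' = cs.getD (M0 + 1) ' ' := by
        have := hrun (M0 + 2) (by omega) (by omega)
        simpa using this
      have hnt2 : M0 + 2 < nt.length := by
        apply hPre (M0 + 2) hcs2 (by omega)
        simpa using hrun2
      apply hD
      rw [List.any_eq_true]
      refine ⟨(((cs.zip nt).zip ((cs.zip nt).tail.zip (cs.zip nt).tail.tail))[M0]'?_),
        List.getElem_mem _, ?_⟩
      · simp only [List.length_zip, List.length_tail]
        omega
      · have hc0 : cs.getD M0 ' ' = cs[M0]'(by omega) := by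
          rw [List.getD_eq_getElem?_getD, List.getElem?_eq_getElem (by omega : M0 < cs.length)]
          rfl
        have hc1 : cs.getD (M0 + 1) ' ' = cs[M0 + 1]'(by omega) := by
          rw [List.getD_eq_getElem?_getD,
            List.getElem?_eq_getElem (by omega : M0 + 1 < cs.length)]
          rfl
        have hc2 : cs.getD (M0 + 2) ' ' = cs[M0 + 2]'(by omega) := by
          rw [List.getD_eq_getElem?_getD,
            List.getElem?_eq_getElem (by omega : M0 + 2 < cs.length)]
          rfl
        have hn0 : nt.getD M0 0 = nt[M0]'(by omega) := by
          rw [List.getD_eq_getElem?_getD, List.getElem?_eq_getElem (by omega : M0 < nt.length)]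
          rfl
        have hn1 : nt.getD (M0 + 1) 0 = nt[M0 + 1]'(by omega) := by
          rw [List.getD_eq_getElem?_getD,
            List.getElem?_eq_getElem (by omega : M0 + 1 < nt.length)]
          rfl
        simp only [List.getElem_zip, List.getElem_tail, Bool.and_eq_true, beq_iff_eq,
          decide_eq_true_eq]
        refine ⟨⟨⟨?_, ?_⟩, ?_⟩, ?_⟩
        · rw [← hc0, ← hc1, hrun1]
        · rw [← hc1, ← hc2, hrun2]
        · rw [← hn0, hPM0]
        · rw [← hn1]; exact hnext
    -- split the range at j
    have hsplit : PySem.List.pyRange ((i + 1 : Nat) : Int) (n : Int) 1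
        = PySem.List.pyRange ((i + 1 : Nat) : Int) (j : Int) 1
          ++ PySem.List.pyRange (j : Int) (n : Int) 1 :=
      PySem.List.pyRange_one_append _ _ _ (by exact_mod_cast hij) (by exact_mod_cast hjn)
    rw [hsplit, List.foldl_append]
    rcases pvL2init cs nt i j t (by omega) hrun hG with ⟨p, hfold⟩
    rw [hfold]
    -- B's contribution on this run
    have hcontrib : bLoop cs nt i
        = (if 1 < j - i then pvS nt i j - pvM nt i j else 0) + bLoop cs nt j := by
      rw [bLoop, dif_pos (show i < cs.length from hin)]
      rw [← hj]
      show (if 1 < j - i then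
          (PySem.List.slice nt (some (i : Int)) (some (j : Int))).sum
            - ((PySem.List.max? (PySem.List.slice nt (some (i : Int)) (some (j : Int))) (fun x => x)).getD 0)
        else 0) + bLoop cs nt j
        = (if 1 < j - i then pvS nt i j - pvM nt i j else 0) + bLoop cs nt j
      by_cases hlen : 1 < j - i
      · rw [if_pos hlen, if_pos hlen]
        have hjnt : j ≤ nt.length := by
          have := hPre (j - 1) (by omega) (by omega) (hrun (j - 1) (by omega) (by omega))
          omega
        rw [pvContrib nt i j (by omega) hjnt]
      · rw [if_neg hlen, if_neg hlen]
    have hT : t + pvS nt i j - pvM nt i j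
        = t + (if 1 < j - i then pvS nt i j - pvM nt i j else 0) := by
      by_cases hlen : 1 < j - i
      · rw [if_pos hlen]; ring
      · rw [if_neg hlen]
        have hji : j = i + 1 := by omega
        rw [hji]
        have h1 : pvS nt i (i + 1) = nt.getD i 0 := by
          rw [pvS_cons nt i (i + 1) (by omega)]
          simp [pvS, pvSeg_empty nt (i + 1) (i + 1) le_rfl]
        rw [h1, pvM_single nt i]
        ring
    rcases Nat.lt_or_ge j n with hjlt | hjge
    · -- another run follows: step j resets prev to -1, then induct
      rw [PySem.List.pyRange_one_cons (by exact_mod_cast hjlt)]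
      simp only [List.foldl_cons]
      have hstop : cs.getD j ' ' ≠ cs.getD (j - 1) ' ' := by
        have h1 : cs.getD j ' ' ≠ cs[i] := bRun_stop cs cs[i] (i + 1) (by omega)
        have h2 : cs.getD (j - 1) ' ' = cs[i] := by
          rcases Nat.lt_or_ge (j - 1) (i + 1) with hm | hm
          · have : j - 1 = i := by omega
            rw [this, hgetDi]
          · exact bRun_run cs cs[i] (i + 1) (j - 1) hm (by omega)
        rw [h2]; exact h1
      have hstep : aStep cs nt (p, t + pvS nt i j - pvM nt i j) (j : Int)
          = (-1, t + pvS nt i j - pvM nt i j) := by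
        have hk1 : ((j : Int) - 1) = ((j - 1 : Nat) : Int) := by omega
        simp only [aStep, hk1, PySem.List.pyGetD_natCast]
        rw [if_pos hstop]
      rw [hstep]
      have hcast : ((j : Int) + 1) = ((j + 1 : Nat) : Int) := by push_cast; ring
      rw [hcast]
      have hrec := ih (n - j) (by omega) j (t + pvS nt i j - pvM nt i j) rfl hjlt
      rw [hrec, hcontrib, hT]
      ring
    · -- the run reaches the end of the string
      rw [PySem.List.pyRange_one_eq_nil (show (n : Int) ≤ (j : Int) by exact_mod_cast hjge)]
      simp only [List.foldl_nil]
      have hbj : bLoop cs nt j = 0 := by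
        rw [bLoop, dif_neg (show ¬ j < cs.length by omega)]
      rw [hcontrib, hbj]
      omega

-- ===== VERDICT (by name: the statement is the Claim_ definition above) =====
theorem lc1578_spec : Claim_equal_lc1578 := by
  intro colors nt _ hPre
  obtain ⟨hPre1, hD⟩ := hPre
  unfold Spec_lc1578 lc1578 lc1578_alt
  set cs := colors.toList with hcs
  rcases Nat.eq_zero_or_pos cs.length with h0 | hpos
  · rw [PySem.List.pyRange_one_eq_nil (by omega)]
    rw [bLoop]
    simp [h0]
  · have hD' : ¬ (((cs.zip nt).zip ((cs.zip nt).tail.zip (cs.zip nt).tail.tail)).any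
        (fun p => p.1.1 == p.2.1.1 && p.2.1.1 == p.2.2.1 && p.1.2 == -1 && decide (p.2.1.2 < -1))
        = true) := hD
    have := pvL3 cs nt hPre1 hD' (cs.length - 0) 0 0 rfl hpos
    norm_num at this
    exact this
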